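-- pv_equiv track=rewrite | github.com/haxscramper/haxconf | desktop/autokey/haxlib/okular_emacs_communication.py | fix_selection
-- ===== SOURCE A (Python) =====
-- def fix_selection(text):
--     result = ""
--     prev_dash = False
--     for line in text.split("\n"):
--         if not prev_dash:
--             result += " "
--
--         clean = line.rstrip("- ")
--         prev_dash = len(clean) != len(line)
--         result += clean
--
--     return result.strip()
-- ===== SOURCE B (Python) =====
-- def fix_selection(text):
--     out = []
--     pending = []
--     for c in text:
--         if c == "\n":
--             if not pending:
--                 out.append(" ")
--             pending = []
--         elif c in "- ":
--             pending.append(c)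
--         else:
--             out.extend(pending)
--             pending = []
--             out.append(c)
--     return "".join(out).strip()
-- ===== Notes on version B (the rewrite author's own statement) =====
-- stated objective: alternative
-- what changed: B never splits the text into lines and never calls rstrip: it is a single character-level state machine over the raw text that buffers each trailing run of dash/space characters and, at a newline, either discards the buffered run (continuation) or emits a separator space.
import Mathlib
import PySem

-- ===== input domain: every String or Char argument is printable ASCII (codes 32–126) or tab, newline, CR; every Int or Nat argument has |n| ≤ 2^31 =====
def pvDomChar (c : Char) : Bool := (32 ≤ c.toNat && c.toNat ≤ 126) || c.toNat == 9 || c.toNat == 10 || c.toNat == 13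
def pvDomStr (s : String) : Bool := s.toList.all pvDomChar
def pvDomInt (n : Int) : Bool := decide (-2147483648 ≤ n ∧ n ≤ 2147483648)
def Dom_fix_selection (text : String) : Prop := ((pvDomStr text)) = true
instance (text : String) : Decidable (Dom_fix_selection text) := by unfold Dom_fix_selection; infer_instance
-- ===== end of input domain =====

-- B replaces A's line split + rstrip + flag-driven concatenation by a single
-- character-level state machine over the raw text (alternative decomposition, same cost).

-- ===== PORT A =====
-- hand port of Python's line.rstrip with dash and space as the stripped set
-- (PySem.Chars.stripChars strips BOTH sides, so this is written out; exact on all inputs)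
def pvRstripDS (cs : List Char) : List Char :=
  (cs.reverse.dropWhile (fun c => (['-', ' '] : List Char).contains c)).reverse

-- loop body of A: state = (result, prev_dash)
def pvStepA (acc : List Char × Bool) (line : List Char) : List Char × Bool :=
  let r := if acc.2 then acc.1 else acc.1 ++ [' ']
  let clean := pvRstripDS line
  (r ++ clean, decide (clean.length ≠ line.length))

def fix_selection (text : String) : String :=
  String.mk (PySem.Chars.strip
    (((PySem.Chars.splitOn text.toList ['\n']).foldl pvStepA ([], false)).1))

-- ===== PORT B =====
-- loop body of B: state = (out, pending); branches in Source B's order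
def pvStepC (s : List Char × List Char) (c : Char) : List Char × List Char :=
  if c = '\n' then (if s.2.isEmpty then s.1 ++ [' '] else s.1, [])
  else if c = '-' ∨ c = ' ' then (s.1, s.2 ++ [c])
  else (s.1 ++ s.2 ++ [c], [])

def fix_selection_alt (text : String) : String :=
  String.mk (PySem.Chars.strip ((text.toList.foldl pvStepC ([], [])).1))

-- ===== PRECONDITION & SPEC =====
def Spec_fix_selection (text : String) (out : String) : Prop := out = fix_selection_alt text
instance (text : String) (out : String) : Decidable (Spec_fix_selection text out) := by unfold Spec_fix_selection; infer_instance

-- ===== CLAIM (what is proved, stated in full; the proofs are below) =====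
def Claim_equal_fix_selection : Prop := ∀ (text : String), Dom_fix_selection text → Spec_fix_selection text (fix_selection text)

-- ===== LEMMAS AND PROOFS =====

-- trailing run of dash/space characters; cs = pvRstripDS cs ++ pvTrail cs
def pvTrail (cs : List Char) : List Char :=
  (cs.reverse.takeWhile (fun c => (['-', ' '] : List Char).contains c)).reverse

lemma pvRT (cs : List Char) : pvRstripDS cs ++ pvTrail cs = cs := by
  unfold pvRstripDS pvTrail
  rw [← List.reverse_append, List.takeWhile_append_dropWhile, List.reverse_reverse]

-- a structural-recursion characterisation of splitOn on the single separator '\n'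
def pvConsHead (x : List Char) : List (List Char) → List (List Char)
  | [] => [x]
  | h :: t => (x ++ h) :: t

def pvSplitNL : List Char → List (List Char)
  | [] => [[]]
  | c :: t => if c = '\n' then [] :: pvSplitNL t else pvConsHead [c] (pvSplitNL t)

lemma pvSplitNL_ne_nil (cs : List Char) : pvSplitNL cs ≠ [] := by
  cases cs with
  | nil => simp [pvSplitNL]
  | cons c t =>
    simp only [pvSplitNL]
    split
    · simp
    · cases h : pvSplitNL t <;> simp [pvConsHead]

lemma pvGo_spec (fuel : Nat) (l cur : List Char) (acc : List (List Char))
    (h : l.length < fuel) :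
    PySem.Chars.splitOn.go ['\n'] fuel l cur acc
      = acc.reverse ++ pvConsHead cur.reverse (pvSplitNL l) := by
  induction fuel generalizing l cur acc with
  | zero => omega
  | succ f ih =>
    cases l with
    | nil => simp [PySem.Chars.splitOn.go, pvSplitNL, pvConsHead]
    | cons c rest =>
      simp only [PySem.Chars.splitOn.go]
      by_cases hc : c = '\n'
      · rw [if_pos (by simp [hc])]
        rw [ih _ _ _ (by simpa using Nat.lt_of_succ_lt_succ h)]
        cases hs : pvSplitNL rest with
        | nil => exact absurd hs (pvSplitNL_ne_nil rest)
        | cons a b => simp [pvSplitNL, hc, hs, pvConsHead]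
      · rw [if_neg (by simpa using Ne.symm hc)]
        rw [ih _ _ _ (by simpa using Nat.lt_of_succ_lt_succ h)]
        cases hs : pvSplitNL rest with
        | nil => exact absurd hs (pvSplitNL_ne_nil rest)
        | cons a b => simp [pvSplitNL, hc, hs, pvConsHead]

lemma pvSplitOn_eq (cs : List Char) :
    PySem.Chars.splitOn cs ['\n'] = pvSplitNL cs := by
  show PySem.Chars.splitOn.go ['\n'] (cs.length + 1) cs [] [] = _
  rw [pvGo_spec _ _ _ _ (by omega)]
  cases hs : pvSplitNL cs with
  | nil => exact absurd hs (pvSplitNL_ne_nil cs)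
  | cons a b => simp [pvConsHead]

-- every piece of pvSplitNL is newline-free
lemma pvSplitNL_noNL (cs : List Char) :
    ∀ l ∈ pvSplitNL cs, ∀ c ∈ l, c ≠ '\n' := by
  induction cs with
  | nil => simp [pvSplitNL]
  | cons c t ih =>
    intro l hl d hd
    simp only [pvSplitNL] at hl
    by_cases hc : c = '\n'
    · rw [if_pos hc, List.mem_cons] at hl
      rcases hl with rfl | hl
      · simp at hd
      · exact ih l hl d hd
    · rw [if_neg hc] at hl
      cases hs : pvSplitNL t with
      | nil => exact absurd hs (pvSplitNL_ne_nil t)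
      | cons a b =>
        rw [hs] at hl
        simp only [pvConsHead, List.mem_cons] at hl
        rcases hl with rfl | hl
        · rcases List.mem_append.mp hd with h | h
          · simpa using (by simpa using h) ▸ hc
          · exact ih a (by rw [hs]; exact List.mem_cons_self) d h
        · exact ih l (by rw [hs]; exact List.mem_cons_of_mem _ hl) d hd

-- the '\n'-intercalation that reconstitutes the text from its lines
def pvInterNL : List (List Char) → List Char
  | [] => []
  | [l] => l
  | l :: t => l ++ '\n' :: pvInterNL t

lemma pvInterNL_splitNL (cs : List Char) : pvInterNL (pvSplitNL cs) = cs := by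
  induction cs with
  | nil => simp [pvSplitNL, pvInterNL]
  | cons c t ih =>
    simp only [pvSplitNL]
    by_cases hc : c = '\n'
    · rw [if_pos hc]
      cases hs : pvSplitNL t with
      | nil => exact absurd hs (pvSplitNL_ne_nil t)
      | cons a b =>
        rw [hs] at ih
        simp [pvInterNL, hc, ← ih]
    · rw [if_neg hc]
      cases hs : pvSplitNL t with
      | nil => exact absurd hs (pvSplitNL_ne_nil t)
      | cons a b =>
        rw [hs] at ih
        cases b with
        | nil => simp [pvConsHead, pvInterNL, ← ih]
        | cons a2 b2 => simp [pvConsHead, pvInterNL, ← ih]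

-- one-step characterisations of the rstrip helper and of the trailing dash/space run
lemma pvR_nil_iff (t : List Char) : pvRstripDS t = [] ↔ ∀ x ∈ t, x = '-' ∨ x = ' ' := by
  simp [pvRstripDS, List.dropWhile_eq_nil_iff]

lemma pvAllTake (t : List Char) (hall : ∀ x ∈ t, x = '-' ∨ x = ' ') :
    List.takeWhile (fun c => decide (c = '-') || decide (c = ' ')) t.reverse = t.reverse :=
  List.takeWhile_eq_self_iff.mpr (fun x hx => by simpa using hall x (by simpa using hx))

lemma pvLenAll (t : List Char)
    (hl : (List.takeWhile (fun c => decide (c = '-') || decide (c = ' ')) t.reverse).length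
      = t.length) : ∀ x ∈ t, x = '-' ∨ x = ' ' := by
  have hself := (List.takeWhile_prefix
    (p := fun c => decide (c = '-') || decide (c = ' ')) (l := t.reverse)).eq_of_length
    (by simpa using hl)
  have h2 := List.takeWhile_eq_self_iff.mp hself
  intro x hx
  simpa using h2 x (by simpa using hx)

lemma pvR_cons_run (c : Char) (t : List Char) (hr : c = '-' ∨ c = ' ') :
    pvRstripDS (c :: t) = if pvRstripDS t = [] then [] else c :: pvRstripDS t := by
  rcases hr with rfl | rfl <;>
    simp [pvRstripDS, List.reverse_cons, List.dropWhile_append, List.dropWhile] <;>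
    split_ifs <;> simp

lemma pvT_cons_run (c : Char) (t : List Char) (hr : c = '-' ∨ c = ' ') :
    pvTrail (c :: t) = if pvRstripDS t = [] then c :: t else pvTrail t := by
  by_cases he : pvRstripDS t = []
  · have hall := (pvR_nil_iff t).mp he
    rcases hr with rfl | rfl <;>
      simp [pvTrail, List.reverse_cons, List.takeWhile_append, List.takeWhile, he] <;>
      (intro hh; exact absurd (by simp [pvAllTake t hall]) hh)
  · have hall := fun h => he ((pvR_nil_iff t).mpr h)
    rcases hr with rfl | rfl <;>
      simp [pvTrail, List.reverse_cons, List.takeWhile_append, he] <;>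
      (intro hh; exact absurd (pvLenAll t hh) hall)

lemma pvR_cons_ord (c : Char) (t : List Char) (h1 : c ≠ '-') (h2 : c ≠ ' ') :
    pvRstripDS (c :: t) = c :: pvRstripDS t := by
  by_cases he : pvRstripDS t = []
  · have hall := (pvR_nil_iff t).mp he
    simp [pvRstripDS, List.reverse_cons, List.dropWhile_append, List.dropWhile, h1, h2, he,
      hall]
  · have hall := fun h => he ((pvR_nil_iff t).mpr h)
    simp [pvRstripDS, List.reverse_cons, List.dropWhile_append, List.dropWhile, h1, h2]

lemma pvT_cons_ord (c : Char) (t : List Char) (h1 : c ≠ '-') (h2 : c ≠ ' ') :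
    pvTrail (c :: t) = if pvRstripDS t = [] then t else pvTrail t := by
  by_cases he : pvRstripDS t = []
  · have hall := (pvR_nil_iff t).mp he
    simp [pvTrail, List.reverse_cons, List.takeWhile_append, List.takeWhile, h1, h2, he]
    rw [pvAllTake t hall]
    simp
  · have hall := fun h => he ((pvR_nil_iff t).mpr h)
    simp [pvTrail, List.reverse_cons, List.takeWhile_append, he]
    intro hh; exact absurd (pvLenAll t hh) hall

-- B's machine over one newline-free line: out grows by the cleaned line, pending = trailing run
lemma pvLineFold (l : List Char) (hn : ∀ c ∈ l, c ≠ '\n') :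
    ∀ out p, l.foldl pvStepC (out, p)
      = (out ++ (if pvRstripDS l = [] then [] else p ++ pvRstripDS l),
         if pvRstripDS l = [] then p ++ l else pvTrail l) := by
  induction l with
  | nil => intro out p; simp [pvRstripDS]
  | cons c t ih =>
    intro out p
    have hcn : c ≠ '\n' := hn c List.mem_cons_self
    have iht := ih (fun d hd => hn d (List.mem_cons_of_mem _ hd))
    by_cases hr : c = '-' ∨ c = ' '
    · -- run character: buffered into pending
      have hs : pvStepC (out, p) c = (out, p ++ [c]) := by
        unfold pvStepC; rw [if_neg hcn, if_pos hr]
      rw [List.foldl_cons, hs, iht, pvR_cons_run c t hr, pvT_cons_run c t hr]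
      by_cases he : pvRstripDS t = [] <;> simp [he]
    · -- ordinary character: pending flushed into out
      have h12 : c ≠ '-' ∧ c ≠ ' ' := not_or.mp hr
      have hs : pvStepC (out, p) c = (out ++ p ++ [c], []) := by
        unfold pvStepC; rw [if_neg hcn, if_neg hr]
      rw [List.foldl_cons, hs, iht, pvR_cons_ord c t h12.1 h12.2, pvT_cons_ord c t h12.1 h12.2]
      by_cases he : pvRstripDS t = [] <;> simp [he]

-- specialisation to pending = []
lemma pvLineFoldNil (l : List Char) (hn : ∀ c ∈ l, c ≠ '\n') (out : List Char) :
    l.foldl pvStepC (out, []) = (out ++ pvRstripDS l, pvTrail l) := by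
  rw [pvLineFold l hn out []]
  by_cases he : pvRstripDS l = []
  · have hTl : pvTrail l = l := by
      have h := pvRT l
      rw [he, List.nil_append] at h
      exact h
    simp [he, hTl]
  · simp [he]

lemma pvStrip_cons_space (x : List Char) :
    PySem.Chars.strip (' ' :: x) = PySem.Chars.strip x := by
  simp [PySem.Chars.strip, PySem.Chars.lstrip, List.dropWhile, PySem.Chars.isspace]

-- the invariant: A's (result, prev_dash) state vs B's machine state across the remaining lines
lemma pvMainInv (lines : List (List Char)) (hne : lines ≠ [])
    (hnl : ∀ l ∈ lines, ∀ c ∈ l, c ≠ '\n') :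
    ∀ (r out : List Char) (pd : Bool),
    ' ' :: out = r ++ (if pd then [] else [' ']) →
    ' ' :: ((pvInterNL lines).foldl pvStepC (out, [])).1
      = (lines.foldl pvStepA (r, pd)).1 := by
  induction lines with
  | nil => exact absurd rfl hne
  | cons l t ih =>
    intro r out pd hinv
    have hl : ∀ c ∈ l, c ≠ '\n' := hnl l List.mem_cons_self
    have hlen : l.length = (pvRstripDS l).length + (pvTrail l).length := by
      conv_lhs => rw [← pvRT l]
      simp
    cases t with
    | nil =>
      simp only [pvInterNL, List.foldl_cons, List.foldl_nil]
      rw [pvLineFoldNil l hl out]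
      simp only [pvStepA]
      rw [← List.cons_append, hinv]
      cases pd <;> simp
    | cons l2 t2 =>
      have hint : pvInterNL (l :: l2 :: t2) = l ++ '\n' :: pvInterNL (l2 :: t2) := rfl
      rw [hint, List.foldl_append, pvLineFoldNil l hl out, List.foldl_cons]
      have hstep : pvStepC (out ++ pvRstripDS l, pvTrail l) '\n'
          = (if pvTrail l = [] then out ++ pvRstripDS l ++ [' ']
             else out ++ pvRstripDS l, []) := by
        unfold pvStepC
        rw [if_pos rfl]
        by_cases h : pvTrail l = [] <;> simp [List.isEmpty_iff, h]
      rw [hstep]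
      simp only [List.foldl_cons]
      have hA : pvStepA (r, pd) l
          = (r ++ (if pd then [] else [' ']) ++ pvRstripDS l,
             decide ((pvRstripDS l).length ≠ l.length)) := by
        simp only [pvStepA]
        cases pd <;> simp
      rw [hA]
      apply ih (by simp) (fun x hx => hnl x (List.mem_cons_of_mem _ hx))
      by_cases he : pvTrail l = []
      · have hd : decide ((pvRstripDS l).length ≠ l.length) = false := by
          simp [hlen, he]
        rw [if_pos he, hd]
        simp [← hinv]
      · have hd : decide ((pvRstripDS l).length ≠ l.length) = true := by
          have hT : (pvTrail l).length ≠ 0 := by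
            simpa [List.length_eq_zero_iff] using he
          simp only [decide_eq_true_eq]
          omega
        rw [if_neg he, hd]
        simp [← hinv]

-- ===== VERDICT (by name: the statement is the Claim_ definition above) =====
theorem fix_selection_spec : Claim_equal_fix_selection := by
  intro text _
  unfold Spec_fix_selection fix_selection fix_selection_alt
  rw [pvSplitOn_eq]
  have h := pvMainInv (pvSplitNL text.toList) (pvSplitNL_ne_nil _)
    (pvSplitNL_noNL _) [] [] false (by simp)
  rw [pvInterNL_splitNL] at h
  rw [← h, pvStrip_cons_space]
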